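/- GENERATED by farm/mkstatement.py from design/units.tsv (unit `digest_extensions.1`) and the assertions of Gif/Spec/Seg_digest_extensions.lean — do not edit.
   THE STATEMENT of the proof unit `digest_extensions.1`: segment 1 of `digest_extensions` (15 instructions; entries 0x105660;
   exits 0x10568d,0x1056f0; ranges 0x105660-0x105689)
   takes each of its entry assertions to one of its exit assertions (`Gif.Spec.digest_extensions.Seg1`), given the contracts of its callees.
   What the names mean: ProgX/Base/Spec/Basic.lean (the shared hypotheses), Gif/Spec/Seg_digest_extensions.lean (the assertions). The theorem to prove:
   `theorem digest_extensions_1_ok : Gif.Spec.digest_extensions_1.Statement`. -/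
import Gif.Code
import Gif.Dec.All
import Gif.Labels
import Gif.Spec.Driver
import Gif.Spec.Seg_digest_extensions
namespace Gif.Spec.digest_extensions_1
open X86 X86.User Asan

/-- The statement of unit `digest_extensions.1`. -/
def Statement : Prop :=
  ∀ (Lay : Layout) (_hLay : Lay.hi = 0x1000000) (μ : Microarch) (_hμ : UserX.MicroOK μ) (u₀ : State)
    (_hcode : HasCodeNat Lay u₀ Gif.L.digest_extensions.entry Gif.Code.code_digest_extensions.nat Gif.L.digest_extensions.size)
    (_h_digest_int : Calls Lay μ ProgX.Base.WayInv (ProgX.Base.conv u₀) Gif.L.digest_int.entry Gif.Spec.digest_int.spec),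
    Gif.Spec.digest_extensions.Seg1 Lay μ u₀

end Gif.Spec.digest_extensions_1
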